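-- pv_equiv track=rewrite | github.com/NatLabRockies/Marine_Energy_Resource_Characterization | tidal/fvcom/high_resolution_tidal_hindcast/summarize_retry_coordinator.py | format_array_indices
-- ===== SOURCE A (Python) =====
-- def format_array_indices(indices):
--     """
--     Format a list of indices into SLURM array specification.
--
--     Converts [1, 2, 3, 5, 7, 8, 9] to "1-3,5,7-9"
--
--     Args:
--         indices: List of integer indices
--
--     Returns:
--         SLURM array specification string
--     """
--     if not indices:
--         return ""
--
--     indices = sorted(indices)
--     ranges = []
--     start = indices[0]
--     end = indices[0]
--
--     for i in indices[1:]: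
--         if i == end + 1:
--             end = i
--         else:
--             if start == end:
--                 ranges.append(str(start))
--             else:
--                 ranges.append(f"{start}-{end}")
--             start = i
--             end = i
--
--     # Don't forget the last range
--     if start == end:
--         ranges.append(str(start))
--     else:
--         ranges.append(f"{start}-{end}")
--
--     return ",".join(ranges)
-- ===== SOURCE B (Python) =====
-- def format_array_indices(indices):
--     """Format indices into a SLURM array spec like "1-3,5,7-9".
--
--     Staged approach: sort, compute break positions, then format each
--     [a, b) segment of the sorted list from the cut-position pairs.
--     """
--     if not indices:
--         return ""
--     s = sorted(indices)
--     n = len(s)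
--     cuts = [0] + [i for i in range(1, n) if s[i] != s[i - 1] + 1] + [n]
--     return ",".join(
--         str(s[a]) if b == a + 1 else f"{s[a]}-{s[b - 1]}"
--         for a, b in zip(cuts, cuts[1:])
--     )
-- ===== Notes on version B (the rewrite author's own statement) =====
-- stated objective: alternative
-- what changed: Replaces A's single-pass start/end state machine with a staged index-arithmetic approach: first compute the list of break positions i where sorted[i] != sorted[i-1]+1, then pair up consecutive cut positions with zip and format each half-open segment [a,b) of the sorted list by indexing, with no running accumulator state.
import Mathlib
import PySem

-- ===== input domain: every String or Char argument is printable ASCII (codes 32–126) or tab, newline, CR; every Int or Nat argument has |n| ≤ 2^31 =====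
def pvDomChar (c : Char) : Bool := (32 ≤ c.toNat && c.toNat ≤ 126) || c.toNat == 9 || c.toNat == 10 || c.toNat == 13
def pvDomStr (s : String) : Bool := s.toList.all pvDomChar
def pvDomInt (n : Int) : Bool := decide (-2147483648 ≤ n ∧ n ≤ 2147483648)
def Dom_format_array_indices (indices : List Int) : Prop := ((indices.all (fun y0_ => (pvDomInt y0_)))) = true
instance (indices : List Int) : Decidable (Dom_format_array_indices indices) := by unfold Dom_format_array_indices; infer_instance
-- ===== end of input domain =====

-- B replaces A's single-pass start/end state machine by a staged approach (same cost): compute the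
-- break positions of the sorted list, then format each segment between consecutive cuts by indexing.

-- ===== PORT A =====
-- the loop body of A's for-loop, on state (ranges, start, end)
def pvStepA (acc : List String × Int × Int) (i : Int) : List String × Int × Int :=
  if i = acc.2.2 + 1 then (acc.1, acc.2.1, i)
  else (acc.1 ++ [if acc.2.1 = acc.2.2 then PySem.Int.toStr acc.2.1
                  else PySem.Int.toStr acc.2.1 ++ "-" ++ PySem.Int.toStr acc.2.2],
        i, i)

def format_array_indices (indices : List Int) : String :=
  if indices = [] then ""
  else
    match PySem.List.sorted indices (fun x => x) false with
    | [] => ""   -- unreachable: sorted of a nonempty list is nonempty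
    | x :: rest =>
      let st := rest.foldl pvStepA ([], x, x)
      let ranges := st.1 ++ [if st.2.1 = st.2.2 then PySem.Int.toStr st.2.1
                             else PySem.Int.toStr st.2.1 ++ "-" ++ PySem.Int.toStr st.2.2]
      PySem.Str.join "," ranges

-- ===== PORT B =====
-- [i for i in range(1, n) if s[i] != s[i-1] + 1]; positions are Nats (0 ≤ i < n), so the
-- in-range Python indexings s[i], s[i-1] are ported as List.getD (exact here).
def pvBreaks (s : List Int) : List Nat :=
  (List.range' 1 (s.length - 1)).filter (fun i => decide (s.getD i 0 ≠ s.getD (i - 1) 0 + 1))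

-- cuts = [0] + breaks + [n]
def pvCuts (s : List Int) : List Nat := 0 :: pvBreaks s ++ [s.length]

-- str(s[a]) if b == a + 1 else f"{s[a]}-{s[b-1]}"
def pvFmtSeg (s : List Int) (p : Nat × Nat) : String :=
  if p.2 = p.1 + 1 then PySem.Int.toStr (s.getD p.1 0)
  else PySem.Int.toStr (s.getD p.1 0) ++ "-" ++ PySem.Int.toStr (s.getD (p.2 - 1) 0)

def format_array_indices_alt (indices : List Int) : String :=
  if indices = [] then ""
  else
    let s := PySem.List.sorted indices (fun x => x) false
    let cuts := pvCuts s
    -- zip(cuts, cuts[1:]) — cuts[1:] is cuts.tail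
    PySem.Str.join "," ((cuts.zip cuts.tail).map (pvFmtSeg s))

-- ===== PRECONDITION & SPEC =====
def Spec_format_array_indices (indices : List Int) (out : String) : Prop := out = format_array_indices_alt indices
instance (indices : List Int) (out : String) : Decidable (Spec_format_array_indices indices out) := by unfold Spec_format_array_indices; infer_instance

-- ===== CLAIM (what is proved, stated in full; the proofs are below) =====
def Claim_equal_format_array_indices : Prop := ∀ (indices : List Int), Dom_format_array_indices indices → Spec_format_array_indices indices (format_array_indices indices)

-- ===== LEMMAS AND PROOFS =====

-- the string A emits when it closes the run start..e
def pvFmt (s e : Int) : String :=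
  if s = e then PySem.Int.toStr s else PySem.Int.toStr s ++ "-" ++ PySem.Int.toStr e

-- splits off the consecutive run continuing e from the front of the list (values only)
def pvRun1 (e : Int) : List Int → List Int × List Int
  | [] => ([], [])
  | y :: l => if y = e + 1 then let r := pvRun1 y l; (y :: r.1, r.2) else ([], y :: l)

-- what A's loop (from state (·, s, e)) appends over the rest of the list, final close included
def pvClose : Int → Int → List Int → List String
  | s, e, [] => [pvFmt s e]
  | s, e, y :: l => if y = e + 1 then pvClose s y l else pvFmt s e :: pvClose y y l

theorem foldl_stepA_eq (l : List Int) : ∀ (ranges : List String) (s e : Int),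
    (l.foldl pvStepA (ranges, s, e)).1 ++
      [pvFmt (l.foldl pvStepA (ranges, s, e)).2.1 (l.foldl pvStepA (ranges, s, e)).2.2]
    = ranges ++ pvClose s e l := by
  induction l with
  | nil => intro ranges s e; simp [pvClose]
  | cons y l ih =>
      intro ranges s e
      simp only [List.foldl_cons, pvStepA, pvClose]
      by_cases h : y = e + 1
      · simp only [if_pos h]
        exact ih ranges s y
      · simp only [if_neg h]
        rw [ih _ y y]
        simp [pvFmt, List.append_assoc]

theorem run1_append (l : List Int) : ∀ e : Int, (pvRun1 e l).1 ++ (pvRun1 e l).2 = l := by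
  induction l with
  | nil => intro e; simp [pvRun1]
  | cons y l ih =>
      intro e
      simp only [pvRun1]
      by_cases h : y = e + 1
      · rw [if_pos h]; simpa using ih y
      · rw [if_neg h]; simp

theorem run1_snd_len (l : List Int) : ∀ e : Int, (pvRun1 e l).2.length ≤ l.length := by
  induction l with
  | nil => intro e; simp [pvRun1]
  | cons y l ih =>
      intro e
      simp only [pvRun1]
      by_cases h : y = e + 1
      · rw [if_pos h]
        exact Nat.le_succ_of_le (ih y)
      · rw [if_neg h]

-- the run continuing e is arithmetic: (e :: run).getD i = e + i
theorem run_arith (l : List Int) : ∀ (e : Int) (i : Nat), i ≤ (pvRun1 e l).1.length →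
    (e :: (pvRun1 e l).1).getD i 0 = e + i := by
  induction l with
  | nil =>
      intro e i h
      have hi : i = 0 := Nat.le_zero.mp (by simpa [pvRun1] using h)
      subst hi
      simp
  | cons y l ih =>
      intro e i h
      simp only [pvRun1] at h ⊢
      by_cases hy : y = e + 1
      · rw [if_pos hy] at h ⊢
        cases i with
        | zero => simp
        | succ j =>
            simp only [List.length_cons, Nat.succ_le_succ_iff] at h
            have hih := ih y j h
            simp only [List.getD_cons_succ]
            rw [hih, hy]
            push_cast
            ring
      · rw [if_neg hy] at h ⊢
        have hi : i = 0 := by simpa using h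
        subst hi
        simp

-- the value after the run does not continue it
theorem run1_break (l : List Int) : ∀ (e y : Int) (l' : List Int),
    (pvRun1 e l).2 = y :: l' → y ≠ e + (pvRun1 e l).1.length + 1 := by
  induction l with
  | nil => intro e y l' h; simp [pvRun1] at h
  | cons z l ih =>
      intro e y l' h
      simp only [pvRun1] at h ⊢
      by_cases hz : z = e + 1
      · rw [if_pos hz] at h ⊢
        have := ih z y l' h
        simp only [List.length_cons]
        push_cast
        omega
      · rw [if_neg hz] at h ⊢
        simp at h
        simp only [List.length_nil]
        omega

theorem pvClose_eq (l : List Int) : ∀ (s e : Int),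
    pvClose s e l = pvFmt s ((pvRun1 e l).1.getLastD e) ::
      (match (pvRun1 e l).2 with
       | [] => []
       | y :: l' => pvClose y y l') := by
  induction l with
  | nil => intro s e; simp [pvClose, pvRun1]
  | cons y l ih =>
      intro s e
      simp only [pvClose, pvRun1]
      by_cases h : y = e + 1
      · rw [if_pos h, if_pos h]
        rw [ih s y, List.getLastD_cons]
      · rw [if_neg h, if_neg h]
        rfl

theorem run_lastD (l : List Int) : ∀ e : Int,
    (pvRun1 e l).1.getLastD e = e + (pvRun1 e l).1.length := by
  induction l with
  | nil => intro e; simp [pvRun1]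
  | cons y l ih =>
      intro e
      simp only [pvRun1]
      by_cases h : y = e + 1
      · rw [if_pos h]
        simp only [List.getLastD_cons, List.length_cons]
        rw [ih y]
        push_cast
        omega
      · rw [if_neg h]; simp

theorem range'_shift : ∀ (n s k : Nat), List.range' (s + k) n = (List.range' s n).map (· + k) := by
  intro n
  induction n with
  | zero => intro s k; simp
  | succ n ih =>
      intro s k
      rw [List.range'_succ, List.range'_succ, List.map_cons, ← ih (s + 1) k,
        show s + 1 * 1 + k = s + k + 1 * 1 by omega]

theorem getD_run_prefix (x : Int) (l : List Int) (i : Nat)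
    (hi : i ≤ (pvRun1 x l).1.length) :
    (x :: l).getD i 0 = x + i := by
  have hsplit : x :: l = (x :: (pvRun1 x l).1) ++ (pvRun1 x l).2 := by
    rw [List.cons_append, run1_append]
  rw [hsplit, List.getD_append _ _ _ _ (by simp; omega)]
  exact run_arith l x i hi

theorem getD_run_suffix (x : Int) (l : List Int) (j : Nat) (d : Int) :
    (x :: l).getD ((pvRun1 x l).1.length + 1 + j) d = (pvRun1 x l).2.getD j d := by
  have hsplit : x :: l = (x :: (pvRun1 x l).1) ++ (pvRun1 x l).2 := by
    rw [List.cons_append, run1_append]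
  conv_lhs => rw [hsplit]
  rw [List.getD_append_right _ _ _ _ (by simp)]
  congr 1
  simp

theorem breaks_prefix_nil (x : Int) (l : List Int) :
    (List.range' 1 (pvRun1 x l).1.length).filter
      (fun i => decide ((x :: l).getD i 0 ≠ (x :: l).getD (i - 1) 0 + 1)) = [] := by
  rw [List.filter_eq_nil_iff]
  intro i hi
  rw [List.mem_range'_1] at hi
  have h1 : (x :: l).getD i 0 = x + i := getD_run_prefix x l i (by omega)
  have h2 : (x :: l).getD (i - 1) 0 = x + ((i - 1 : Nat) : Int) :=
    getD_run_prefix x l (i - 1) (by omega)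
  simp only [h1, h2, decide_eq_true_eq, not_not, ne_eq]
  omega

-- break positions of (x :: l): the first-run length, then the shifted breaks of the rest
theorem breaks_run (x : Int) (l : List Int) (y : Int) (l' : List Int)
    (h : (pvRun1 x l).2 = y :: l') :
    pvBreaks (x :: l) = ((pvRun1 x l).1.length + 1) ::
      (pvBreaks (y :: l')).map (· + ((pvRun1 x l).1.length + 1)) := by
  have hlen : l.length = (pvRun1 x l).1.length + (l'.length + 1) := by
    conv_lhs => rw [← run1_append l x, h]
    simp
  have hrange : List.range' 1 ((x :: l).length - 1)
      = List.range' 1 (pvRun1 x l).1.length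
        ++ List.range' ((pvRun1 x l).1.length + 1) (l'.length + 1) := by
    have hap := @List.range'_append 1 (pvRun1 x l).1.length (l'.length + 1) 1
    simp only [one_mul] at hap
    rw [show (pvRun1 x l).1.length + 1 = 1 + (pvRun1 x l).1.length by omega, hap]
    simp [hlen]
  unfold pvBreaks
  rw [hrange, List.filter_append, breaks_prefix_nil x l, List.nil_append,
      List.range'_succ, List.filter_cons]
  have hky : (x :: l).getD ((pvRun1 x l).1.length + 1) 0 = y := by
    have h0 := getD_run_suffix x l 0 0
    rw [h] at h0
    simpa using h0
  have hkprev : (x :: l).getD ((pvRun1 x l).1.length + 1 - 1) 0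
      = x + ((pvRun1 x l).1.length : Int) := by
    simpa using getD_run_prefix x l (pvRun1 x l).1.length (le_refl _)
  have hbreak := run1_break l x y l' h
  rw [if_pos (by simp only [hky, hkprev, decide_eq_true_eq, ne_eq]; exact hbreak)]
  congr 1
  have hsh : List.range' ((pvRun1 x l).1.length + 1 + 1) l'.length
      = (List.range' 1 l'.length).map (· + ((pvRun1 x l).1.length + 1)) := by
    rw [show (pvRun1 x l).1.length + 1 + 1 = 1 + ((pvRun1 x l).1.length + 1) by omega]
    exact range'_shift l'.length 1 _
  rw [hsh, List.filter_map]
  show _ = ((List.range' 1 ((y :: l').length - 1)).filter _).map _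
  simp only [List.length_cons, Nat.add_sub_cancel]
  congr 1
  apply List.filter_congr
  intro i hi
  rw [List.mem_range'_1] at hi
  simp only [Function.comp]
  have hup : (x :: l).getD (i + ((pvRun1 x l).1.length + 1)) 0 = (y :: l').getD i 0 := by
    have := getD_run_suffix x l i 0
    rw [h] at this
    rw [← this]
    congr 1
    omega
  have hdown : (x :: l).getD (i + ((pvRun1 x l).1.length + 1) - 1) 0
      = (y :: l').getD (i - 1) 0 := by
    have := getD_run_suffix x l (i - 1) 0
    rw [h] at this
    rw [← this]
    congr 1
    omega
  rw [hup, hdown]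

theorem cuts_tail_pos (s : List Int) (b : Nat)
    (hb : b ∈ pvBreaks s ++ [s.length]) (hs : s ≠ []) : 1 ≤ b := by
  rcases List.mem_append.mp hb with hmem | hmem
  · have := (List.mem_filter.mp hmem).1
    rw [List.mem_range'_1] at this
    omega
  · simp only [List.mem_singleton] at hmem
    subst hmem
    exact List.length_pos_of_ne_nil hs

theorem seg_first (x : Int) (l : List Int) :
    pvFmtSeg (x :: l) (0, (pvRun1 x l).1.length + 1) = pvFmt x ((pvRun1 x l).1.getLastD x) := by
  rw [run_lastD]
  unfold pvFmtSeg pvFmt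
  rcases Nat.eq_zero_or_pos (pvRun1 x l).1.length with h0 | hpos
  · simp [h0]
  · rw [if_neg (by simp; intro hc; rw [hc] at hpos; simp at hpos), if_neg (by intro hc; omega)]
    have h2 : (x :: l).getD ((pvRun1 x l).1.length + 1 - 1) 0
        = x + ((pvRun1 x l).1.length : Int) := by
      simpa using getD_run_prefix x l (pvRun1 x l).1.length (le_refl _)
    simp only [Nat.add_sub_cancel] at h2
    simp only [List.getD_eq_getElem?_getD] at h2 ⊢
    simp [h2]

theorem segs_close : ∀ (N : Nat) (l : List Int), l.length ≤ N → ∀ x : Int,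
    ((pvCuts (x :: l)).zip (pvCuts (x :: l)).tail).map (pvFmtSeg (x :: l)) = pvClose x x l := by
  intro N
  induction N with
  | zero =>
      intro l hl x
      have : l = [] := List.eq_nil_of_length_eq_zero (Nat.le_zero.mp hl)
      subst this
      simp [pvCuts, pvBreaks, pvClose, pvFmtSeg, pvFmt]
  | succ N ih =>
      intro l hl x
      rw [pvClose_eq]
      rcases hrest : (pvRun1 x l).2 with _ | ⟨y, l'⟩
      · -- the whole list is one consecutive run
        have hlr : (pvRun1 x l).1 = l := by
          have := run1_append l x
          rw [hrest] at this
          simpa using this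
        have hbr : pvBreaks (x :: l) = [] := by
          unfold pvBreaks
          have := breaks_prefix_nil x l
          rw [hlr] at this
          simpa using this
        rw [show pvCuts (x :: l) = [0, (x :: l).length] by simp [pvCuts, hbr]]
        rw [show (x :: l).length = (pvRun1 x l).1.length + 1 by simp [hlr]]
        simpa using seg_first x l
      · -- first run, then recurse on the remainder
        have hlen : l.length = (pvRun1 x l).1.length + (l'.length + 1) := by
          conv_lhs => rw [← run1_append l x, hrest]
          simp
        have hcuts : pvCuts (x :: l)
            = 0 :: (pvCuts (y :: l')).map (· + ((pvRun1 x l).1.length + 1)) := by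
          unfold pvCuts
          rw [breaks_run x l y l' hrest]
          simp only [List.map_cons, List.map_append, List.map_nil, List.cons_append,
            List.length_cons, Nat.zero_add]
          rw [show l.length + 1 = l'.length + 1 + ((pvRun1 x l).1.length + 1) by omega]
        rw [hcuts]
        have hC : pvCuts (y :: l')
            = 0 :: (pvBreaks (y :: l') ++ [(y :: l').length]) := rfl
        rw [hC]
        simp only [List.map_cons, List.tail_cons, List.zip_cons_cons, List.map_cons,
          Nat.zero_add]
        rw [show (((pvRun1 x l).1.length + 1)
              :: (pvBreaks (y :: l') ++ [(y :: l').length]).map (· + ((pvRun1 x l).1.length + 1)))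
            = ((0 :: (pvBreaks (y :: l') ++ [(y :: l').length])).map (· + ((pvRun1 x l).1.length + 1)))
          by simp]
        rw [List.zip_map, List.map_map]
        congr 1
        · exact seg_first x l
        · have hl' : l'.length ≤ N := by
            have h1 := run1_snd_len l x
            rw [hrest] at h1
            simp only [List.length_cons] at h1
            omega
          have hrec := ih l' hl' y
          rw [hC] at hrec
          rw [← hrec]
          apply List.map_congr_left
          intro p hp
          obtain ⟨a, b⟩ := p
          have hb : b ∈ pvBreaks (y :: l') ++ [(y :: l').length] :=
            (List.of_mem_zip hp).2
          have hb1 : 1 ≤ b := cuts_tail_pos (y :: l') b hb (by simp)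
          simp only [Function.comp_apply, Prod.map_apply]
          unfold pvFmtSeg
          dsimp only
          have hup : (x :: l).getD (a + ((pvRun1 x l).1.length + 1)) 0
              = (y :: l').getD a 0 := by
            have := getD_run_suffix x l a 0
            rw [hrest] at this
            rw [← this]
            congr 1
            omega
          have hdown : (x :: l).getD (b + ((pvRun1 x l).1.length + 1) - 1) 0
              = (y :: l').getD (b - 1) 0 := by
            have := getD_run_suffix x l (b - 1) 0
            rw [hrest] at this
            rw [← this]
            congr 1
            omega
          by_cases hc : b = a + 1
          · rw [if_pos (by omega), if_pos hc, hup]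
          · rw [if_neg (by omega), if_neg hc, hup, hdown]

-- ===== VERDICT (by name: the statement is the Claim_ definition above) =====
theorem format_array_indices_spec : Claim_equal_format_array_indices := by
  intro indices _
  unfold Spec_format_array_indices format_array_indices format_array_indices_alt
  by_cases h : indices = []
  · subst h
    rw [if_pos rfl, if_pos rfl]
  · rw [if_neg h, if_neg h]
    rcases hs : PySem.List.sorted indices (fun x => x) false with _ | ⟨x, rest⟩
    · exact absurd ((PySem.List.sorted_eq_nil_iff _ _ _).mp hs) h
    · have hA := foldl_stepA_eq rest [] x x
      simp only [List.nil_append, pvFmt] at hA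
      dsimp only
      rw [segs_close rest.length rest (le_refl _) x]
      exact congrArg (PySem.Str.join ",") hA
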